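-- pv_equiv track=rewrite | github.com/gentle-breeze/iterAssAna | main/regularTwoSet.py | getNewSubSet
-- ===== SOURCE A (Python) =====
-- def getNewSubSet(set_AND, interval):
--     flag = True
--     set_SUB1 = set()
--     set_SUB2 = set()
--     for i in range(interval[0],interval[1]):
--         if(i in set_AND):
--             flag = False
--         if(flag):
--             set_SUB1.add(i)
--         else:
--             set_SUB2.add(i)
--     return set_SUB1, set_SUB2
-- ===== SOURCE B (Python) =====
-- def getNewSubSet(set_AND, interval):
--     a, b = interval
--     split = next((i for i in range(a, b) if i in set_AND), b)
--     return set(range(a, split)), set(range(split, b))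
-- ===== Notes on version B (the rewrite author's own statement) =====
-- stated objective: simpler
-- what changed: Replaces the flag-carrying scan that classifies each element one by one with finding the first set_AND member (the split point) and building both sets directly from two ranges.
import Mathlib
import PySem

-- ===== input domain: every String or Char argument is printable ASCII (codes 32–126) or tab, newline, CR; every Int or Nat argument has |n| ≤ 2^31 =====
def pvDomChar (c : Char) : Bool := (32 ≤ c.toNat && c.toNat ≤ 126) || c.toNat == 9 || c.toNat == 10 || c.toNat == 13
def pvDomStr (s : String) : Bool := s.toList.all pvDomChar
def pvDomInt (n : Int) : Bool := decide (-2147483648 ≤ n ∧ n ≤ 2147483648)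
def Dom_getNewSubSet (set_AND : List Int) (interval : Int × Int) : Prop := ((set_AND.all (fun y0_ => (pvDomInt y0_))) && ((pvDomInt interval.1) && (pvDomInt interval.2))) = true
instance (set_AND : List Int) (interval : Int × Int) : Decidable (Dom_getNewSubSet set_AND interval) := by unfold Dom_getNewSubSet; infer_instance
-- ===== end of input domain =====

-- B replaces A's flag-carrying scan by locating the first set_AND member (the split
-- point) and building both result sets directly from two ranges (objective: simpler).

-- ===== PORT A =====
def getNewSubSet (set_AND : List Int) (interval : Int × Int) : List Int × List Int :=
  let r := (PySem.List.pyRange interval.1 interval.2 1).foldl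
      (fun (st : Bool × PySem.Set Int × PySem.Set Int) i =>
        let flag := if set_AND.contains i then false else st.1
        if flag then (flag, PySem.Set.add st.2.1 i, st.2.2)
        else (flag, st.2.1, PySem.Set.add st.2.2 i))
      (true, PySem.Set.empty, PySem.Set.empty)
  (r.2.1, r.2.2)

-- ===== PORT B =====
-- split = next((i for i in range(a, b) if i in set_AND), b)
def getNewSubSet_alt (set_AND : List Int) (interval : Int × Int) : List Int × List Int :=
  let a := interval.1
  let b := interval.2
  let split := (((PySem.List.pyRange a b 1).filter (fun i => set_AND.contains i)).head?).getD b
  (PySem.Set.ofList (PySem.List.pyRange a split 1),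
   PySem.Set.ofList (PySem.List.pyRange split b 1))

-- ===== PRECONDITION & SPEC =====
def Spec_getNewSubSet (set_AND : List Int) (interval : Int × Int) (out : List Int × List Int) : Prop := out = getNewSubSet_alt set_AND interval
instance (set_AND : List Int) (interval : Int × Int) (out : List Int × List Int) : Decidable (Spec_getNewSubSet set_AND interval out) := by unfold Spec_getNewSubSet; infer_instance

-- ===== CLAIM (what is proved, stated in full; the proofs are below) =====
def Claim_equal_getNewSubSet : Prop := ∀ (set_AND : List Int) (interval : Int × Int), Dom_getNewSubSet set_AND interval → Spec_getNewSubSet set_AND interval (getNewSubSet set_AND interval)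

-- ===== LEMMAS AND PROOFS =====

-- A's loop body, abbreviated for the proofs
def pvStep (set_AND : List Int) (st : Bool × PySem.Set Int × PySem.Set Int) (i : Int) :
    Bool × PySem.Set Int × PySem.Set Int :=
  let flag := if set_AND.contains i then false else st.1
  if flag then (flag, PySem.Set.add st.2.1 i, st.2.2)
  else (flag, st.2.1, PySem.Set.add st.2.2 i)

-- while no member is seen, the flag stays true and everything goes into SUB1
theorem pvFold_noMem (set_AND : List Int) (l : List Int)
    (h : ∀ i ∈ l, set_AND.contains i = false) (s1 s2 : PySem.Set Int) :
    l.foldl (pvStep set_AND) (true, s1, s2) = (true, l.foldl PySem.Set.add s1, s2) := by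
  induction l generalizing s1 with
  | nil => rfl
  | cons x t ih =>
    have hx := h x (List.mem_cons_self)
    simp only [List.foldl_cons, pvStep, hx]
    simpa using ih (fun i hi => h i (List.mem_cons_of_mem _ hi)) (PySem.Set.add s1 x)

-- once the flag is false it stays false and everything goes into SUB2
theorem pvFold_after (set_AND : List Int) (l : List Int) (s1 s2 : PySem.Set Int) :
    l.foldl (pvStep set_AND) (false, s1, s2) = (false, s1, l.foldl PySem.Set.add s2) := by
  induction l generalizing s2 with
  | nil => rfl
  | cons x t ih =>
    simp only [List.foldl_cons, pvStep]
    split <;> simp_all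

theorem getNewSubSet_spec_aux (set_AND : List Int) (interval : Int × Int) :
    getNewSubSet set_AND interval = getNewSubSet_alt set_AND interval := by
  obtain ⟨a, b⟩ := interval
  show (((PySem.List.pyRange a b 1).foldl (pvStep set_AND)
          (true, PySem.Set.empty, PySem.Set.empty)).2.1,
        ((PySem.List.pyRange a b 1).foldl (pvStep set_AND)
          (true, PySem.Set.empty, PySem.Set.empty)).2.2) = _
  unfold getNewSubSet_alt
  cases hfl : (PySem.List.pyRange a b 1).filter (fun i => set_AND.contains i) with
  | nil =>
    have hnone : ∀ i ∈ PySem.List.pyRange a b 1, set_AND.contains i = false := by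
      intro i hi
      have := List.filter_eq_nil_iff.mp hfl i hi
      simpa using this
    simp only [hfl, Option.getD_none, List.head?_nil]
    rw [pvFold_noMem set_AND _ hnone]
    have hbb : PySem.List.pyRange b b 1 = [] := PySem.List.pyRange_one_eq_nil le_rfl
    simp [PySem.Set.empty, hbb, PySem.Set.ofList]
  | cons m rest =>
    -- m is the first member of set_AND in the range
    have hm_mem : m ∈ PySem.List.pyRange a b 1 := by
      have : m ∈ (PySem.List.pyRange a b 1).filter (fun i => set_AND.contains i) := by
        rw [hfl]; exact List.mem_cons_self
      exact List.mem_of_mem_filter this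
    have hm_in : set_AND.contains m = true := by
      have : m ∈ (PySem.List.pyRange a b 1).filter (fun i => set_AND.contains i) := by
        rw [hfl]; exact List.mem_cons_self
      exact List.of_mem_filter this
    obtain ⟨ham, hmb⟩ := (PySem.List.mem_pyRange_one).mp hm_mem
    have hsplitRange : PySem.List.pyRange a b 1 =
        PySem.List.pyRange a m 1 ++ PySem.List.pyRange m b 1 :=
      PySem.List.pyRange_one_append a m b ham (le_of_lt hmb)
    have hmb1 : PySem.List.pyRange m b 1 = m :: PySem.List.pyRange (m+1) b 1 :=
      PySem.List.pyRange_one_cons hmb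
    -- no member strictly before m
    have hpre : ∀ i ∈ PySem.List.pyRange a m 1, set_AND.contains i = false := by
      intro i hi
      by_contra hcon
      have hi' : set_AND.contains i = true := by
        cases h : set_AND.contains i with
        | false => exact absurd h hcon
        | true => rfl
      -- then i would be the head of the filtered list, but i < m
      have hfilter : (PySem.List.pyRange a b 1).filter (fun i => set_AND.contains i) =
          ((PySem.List.pyRange a m 1).filter (fun i => set_AND.contains i)) ++
          ((PySem.List.pyRange m b 1).filter (fun i => set_AND.contains i)) := by
        rw [hsplitRange, List.filter_append]
      have hilt : i < m := ((PySem.List.mem_pyRange_one).mp hi).2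
      cases hpf : (PySem.List.pyRange a m 1).filter (fun i => set_AND.contains i) with
      | nil =>
        have := List.filter_eq_nil_iff.mp hpf i hi
        exact this (by simpa using hi')
      | cons j t =>
        have hjm : j ∈ PySem.List.pyRange a m 1 :=
          List.mem_of_mem_filter (by rw [hpf]; exact List.mem_cons_self)
        have hjlt : j < m := ((PySem.List.mem_pyRange_one).mp hjm).2
        have : m = j := by
          have := hfl.symm.trans (hfilter.trans (by rw [hpf]))
          exact (List.cons.injEq _ _ _ _ ▸ this).1
        omega
    -- evaluate A's fold
    rw [hsplitRange, List.foldl_append, pvFold_noMem set_AND _ hpre, hmb1,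
        List.foldl_cons]
    have hstep : pvStep set_AND (true, (PySem.List.pyRange a m 1).foldl PySem.Set.add PySem.Set.empty, PySem.Set.empty) m
        = (false, (PySem.List.pyRange a m 1).foldl PySem.Set.add PySem.Set.empty, PySem.Set.add PySem.Set.empty m) := by
      have hm' : m ∈ set_AND := by simpa using hm_in
      simp [pvStep, hm']
    rw [hstep, pvFold_after]
    -- evaluate B
    simp only [hfl, List.head?_cons, Option.getD_some]
    rw [hmb1]
    simp [PySem.Set.ofList_eq_foldl, PySem.Set.empty]

-- ===== VERDICT (by name: the statement is the Claim_ definition above) =====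
theorem getNewSubSet_spec : Claim_equal_getNewSubSet := by
  intro set_AND interval _
  show _ = _
  exact getNewSubSet_spec_aux set_AND interval
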